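-- pv_equiv track=rewrite | github.com/ZJendex/muscle_plot | evaluation_result_isometric_force/plot_compare_two_methods.py | group_by_subject
-- ===== SOURCE A (Python) =====
-- def group_by_subject(results):
--     """Group results by subject name (without date)."""
--     subject_groups = {}
--
--     for result in results:
--         full_name = result['subject']
--         # Extract person name (after date)
--         person_name = full_name.split('_')[1] if '_' in full_name else full_name
--
--         if person_name not in subject_groups:
--             subject_groups[person_name] = []
--
--         subject_groups[person_name].append(result)
--
--     return subject_groups
-- ===== SOURCE B (Python) =====
-- def group_by_subject(results):
--     """Group results by subject name (without date)."""
--     def key(result):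
--         full_name = result['subject']
--         return full_name.split('_')[1] if '_' in full_name else full_name
--
--     names = list(dict.fromkeys(key(result) for result in results))
--     return {name: [result for result in results if key(result) == name]
--             for name in names}
-- ===== Notes on version B (the rewrite author's own statement) =====
-- stated objective: alternative
-- what changed: B replaces A's single-pass dict-append grouping by a two-phase plan: an ordered dedup of the extracted subject keys, then one dict comprehension that filters the matching results per key.
import Mathlib
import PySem

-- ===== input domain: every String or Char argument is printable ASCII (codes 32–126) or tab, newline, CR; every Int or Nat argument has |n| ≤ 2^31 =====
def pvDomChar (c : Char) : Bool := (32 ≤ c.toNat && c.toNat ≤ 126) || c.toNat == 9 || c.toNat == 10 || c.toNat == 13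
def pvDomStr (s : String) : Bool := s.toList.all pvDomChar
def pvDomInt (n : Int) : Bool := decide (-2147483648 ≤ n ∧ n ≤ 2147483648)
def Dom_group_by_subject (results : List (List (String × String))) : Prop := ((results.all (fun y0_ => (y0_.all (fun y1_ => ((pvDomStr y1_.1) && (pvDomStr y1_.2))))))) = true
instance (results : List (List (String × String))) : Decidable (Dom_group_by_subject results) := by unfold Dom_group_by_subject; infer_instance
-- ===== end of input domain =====

-- B groups by an ordered dedup of the extracted subject keys followed by one filter per key,
-- instead of A's single-pass dict-append grouping (alternative decomposition, return value only).


-- person_name = full_name.split('_')[1] if '_' in full_name else full_name  (shared text of A and B)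
def personName (full : String) : String :=
  if PySem.Str.isIn "_" full then
    (PySem.List.pyGet? ((PySem.Str.split? full "_").getD []) 1).getD ""
  else full

-- result['subject'] followed by the person-name extraction; none = KeyError (excluded by Pre_)
def keyOf (result : List (String × String)) : Option String :=
  ((PySem.Dict.mk result).get? "subject").map personName

-- ===== PORT A =====
def group_by_subject (results : List (List (String × String))) : List (String × List (List (String × String))) :=
  (results.foldl (fun subject_groups result =>
      match keyOf result with
      | none => subject_groups   -- KeyError in Python; unreachable under Pre_
      | some person_name =>
          -- if person_name not in subject_groups: subject_groups[person_name] = []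
          -- subject_groups[person_name].append(result)
          PySem.Dict.modify subject_groups person_name [] (fun g => g ++ [result]))
    PySem.Dict.empty).items

-- ===== PORT B =====
def group_by_subject_alt (results : List (List (String × String))) : List (String × List (List (String × String))) :=
  (PySem.List.dedup (results.filterMap keyOf)).map
    (fun name => (name, results.filter (fun result => keyOf result == some name)))

-- ===== PRECONDITION & SPEC =====
-- Pre_ excludes exactly the results lacking a 'subject' key, on which Python A raises KeyError.
def Pre_group_by_subject (results : List (List (String × String))) : Prop :=
  ∀ r ∈ results, "subject" ∈ r.map Prod.fst
instance (results : List (List (String × String))) : Decidable (Pre_group_by_subject results) := by unfold Pre_group_by_subject; infer_instance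
def pvWitness_group_by_subject : (List (List (String × String))) :=
  [[("subject", "0101_bob")], [("subject", "0202_bob")], [("subject", "alice")]]
def Spec_group_by_subject (results : List (List (String × String))) (out : List (String × List (List (String × String)))) : Prop := out = group_by_subject_alt results
instance (results : List (List (String × String))) (out : List (String × List (List (String × String)))) : Decidable (Spec_group_by_subject results out) := by unfold Spec_group_by_subject; infer_instance

-- ===== CLAIM (what is proved, stated in full; the proofs are below) =====
def Claim_equal_group_by_subject : Prop := ∀ (results : List (List (String × String))), Dom_group_by_subject results → Pre_group_by_subject results → Spec_group_by_subject results (group_by_subject results)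

-- ===== LEMMAS AND PROOFS =====

-- ofList over a snoc is Set.add
lemma ofList_snoc {α : Type} [BEq α] (l : List α) (a : α) :
    PySem.Set.ofList (l ++ [a]) = PySem.Set.add (PySem.Set.ofList l) a := by
  simp [PySem.Set.ofList_eq_foldl, List.foldl_append]

-- the grouping dict built by A's loop, in terms of B's dedup-then-filter plan
lemma fold_items (k : List (String × String) → Option String)
    (xs : List (List (String × String))) :
    (xs.foldl (fun d r =>
        match k r with
        | none => d
        | some n => PySem.Dict.modify d n [] (fun g => g ++ [r]))
      PySem.Dict.empty).items
    = (PySem.Set.ofList (xs.filterMap k)).map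
        (fun n => (n, xs.filter (fun r => k r == some n))) := by
  induction xs using List.reverseRecOn with
  | nil => rfl
  | append_singleton xs x ih =>
    rw [List.foldl_append, List.foldl_cons, List.foldl_nil]
    cases hx : k x with
    | none =>
      rw [ih]
      have hfm : (xs ++ [x]).filterMap k = xs.filterMap k := by
        simp [List.filterMap_append, hx]
      rw [hfm]
      refine List.map_congr_left ?_
      intro n _
      simp [List.filter_append, hx]
    | some c =>
      -- state of the dict before this step
      set D := (xs.foldl (fun d r =>
          match k r with
          | none => d
          | some n => PySem.Dict.modify d n [] (fun g => g ++ [r]))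
        PySem.Dict.empty) with hD
      have hitems : D.items = (PySem.Set.ofList (xs.filterMap k)).map
          (fun n => (n, xs.filter (fun r => k r == some n))) := ih
      set S := PySem.Set.ofList (xs.filterMap k) with hS
      have hkeys : D.keys = S := by
        simp [PySem.Dict.keys, hitems, List.map_map, Function.comp_def]
      have hnodup : S.Nodup := PySem.Set.nodup_ofList _
      have hfm : (xs ++ [x]).filterMap k = xs.filterMap k ++ [c] := by
        simp [List.filterMap_append, hx]
      have hcont : D.contains c = decide (c ∈ S) := by
        rw [PySem.Dict.contains_eq_decide_mem_keys, hkeys]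
      have hfilter : ∀ n, (xs ++ [x]).filter (fun r => k r == some n)
          = xs.filter (fun r => k r == some n) ++ (if c = n then [x] else []) := by
        intro n
        rw [List.filter_append]
        congr 1
        by_cases h : c = n
        · subst h; simp [List.filter, hx]
        · have hb : (c == n) = false := beq_eq_false_iff_ne.mpr h
          simp [List.filter, hx, hb, h]
      rw [hfm, ofList_snoc]
      by_cases hc : c ∈ S
      · -- key already present: entry updated in place, key order unchanged
        have hadd : PySem.Set.add S c = S := by
          simp [PySem.Set.add, hc]
        have hgetD : D.getD c [] = xs.filter (fun r => k r == some c) := by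
          have hmem : (c, xs.filter (fun r => k r == some c)) ∈ D.items := by
            rw [hitems]; exact List.mem_map_of_mem hc
          exact PySem.Dict.getD_of_mem_items D hmem (by rw [hkeys]; exact hnodup) []
        have hcontT : D.contains c = true := by rw [hcont]; simp [hc]
        show (PySem.Dict.modify D c [] (fun g => g ++ [x])).items = _
        unfold PySem.Dict.modify
        rw [PySem.Dict.items_insert_of_contains D _ hcontT, hitems, List.map_map, hadd]
        refine List.map_congr_left ?_
        intro n hn
        by_cases h : n = c
        · subst h; simp [hgetD, hfilter n]
        · have hbc : (n == c) = false := by simp [h]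
          have hcn : ¬c = n := fun e => h e.symm
          simp [Function.comp, hbc, hfilter n, hcn]
      · -- fresh key: appended at the end
        have hadd : PySem.Set.add S c = S ++ [c] := by
          simp [PySem.Set.add, hc]
        have hcontF : D.contains c = false := by rw [hcont]; simp [hc]
        have hgetD : D.getD c [] = [] := PySem.Dict.getD_of_not_contains D [] hcontF
        have hfc : xs.filter (fun r => k r == some c) = [] := by
          rw [List.filter_eq_nil_iff]
          intro r hr hkr
          exact hc ((PySem.Set.mem_ofList _ _).2
            (List.mem_filterMap.2 ⟨r, hr, by simpa using hkr⟩))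
        show (PySem.Dict.modify D c [] (fun g => g ++ [x])).items = _
        unfold PySem.Dict.modify
        rw [PySem.Dict.items_insert_of_not_contains D _ hcontF, hitems, hadd,
          List.map_append, hgetD]
        refine congrArg₂ _ ?_ (by simp [hfc, List.filter, hx])
        refine List.map_congr_left ?_
        intro n hn
        have : c ≠ n := fun h => hc (h ▸ hn)
        simp [hfilter n, this]

-- ===== VERDICT (by name: the statement is the Claim_ definition above) =====
theorem group_by_subject_spec : Claim_equal_group_by_subject := by
  intro results _ _
  show group_by_subject results = group_by_subject_alt results
  unfold group_by_subject group_by_subject_alt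
  rw [PySem.List.dedup_eq_ofList]
  exact fold_items keyOf results
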